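-- pv_equiv track=rewrite | github.com/ji1kang/coding-test-notebook | 프로그래머스/완전탐색-42840-모의고사.py | solution
-- ===== SOURCE A (Python) =====
-- def solution(answers):
--     """
--     - log(n)
--
--     - count = []
--
--
--     ! 답이 두명이상일 수 있다 - 이때는 오름차순 정렬
--     """
--
--     arr1 = [1, 2, 3, 4, 5]
--     arr2 = [2, 1, 2, 3, 2, 4, 2, 5]
--     arr3 = [3, 3, 1, 1, 2, 2, 4, 4, 5, 5]
--
--     count = [0, 0, 0]
--
--     for i, a in enumerate(answers):
--         if arr1[i % 5] == a:
--             count[0] += 1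
--
--         if arr2[i % 8] == a:
--             count[1] += 1
--
--         if arr3[i % 10 ] == a:
--             count[2] += 1
--
--
--     max_val = max(count)
--     answer = [i+1 for i, val in enumerate(count) if val == max_val]
--     return answer
-- ===== SOURCE B (Python) =====
-- def solution(answers):
--     # Tally (position mod 40, answer) pairs once; 40 = lcm of the pattern periods,
--     # so each pattern's score is a 40-term lookup sum over one lcm period.
--     tally = {}
--     for i, a in enumerate(answers):
--         key = (i % 40, a)
--         tally[key] = tally.get(key, 0) + 1
--     patterns = [[1, 2, 3, 4, 5],
--                 [2, 1, 2, 3, 2, 4, 2, 5],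
--                 [3, 3, 1, 1, 2, 2, 4, 4, 5, 5]]
--     scores = [sum(tally.get((r, p[r % len(p)]), 0) for r in range(40))
--               for p in patterns]
--     best = max(scores)
--     return [i + 1 for i, s in enumerate(scores) if s == best]
-- ===== Notes on version B (the rewrite author's own statement) =====
-- stated objective: alternative
-- what changed: B never compares answers against the patterns while scanning: it builds a histogram of (index mod 40, answer) pairs in one pass (40 = lcm of the three pattern periods) and then computes each pattern's score as a 40-term dictionary-lookup sum over one lcm period, whereas A matches every answer against all three patterns by modular indexing inside the scan.
import Mathlib
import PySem

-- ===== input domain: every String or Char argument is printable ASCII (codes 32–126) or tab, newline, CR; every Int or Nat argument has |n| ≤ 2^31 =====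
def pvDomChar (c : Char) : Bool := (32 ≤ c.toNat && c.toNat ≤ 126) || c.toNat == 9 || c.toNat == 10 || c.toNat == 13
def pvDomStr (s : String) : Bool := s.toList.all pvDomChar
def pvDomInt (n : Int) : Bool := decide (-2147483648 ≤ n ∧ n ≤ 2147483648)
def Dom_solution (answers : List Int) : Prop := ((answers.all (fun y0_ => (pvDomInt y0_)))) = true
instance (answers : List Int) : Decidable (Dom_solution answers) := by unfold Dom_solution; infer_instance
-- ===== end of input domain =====

-- B replaces A's match-while-scanning with a (index mod 40, answer) histogram plus per-pattern 40-term lookup sums; same values everywhere.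

-- ===== PORT A =====
-- A: one loop over enumerate(answers) updating three counters via modular indexing, then max and filter.
def solution (answers : List Int) : List Int :=
  let arr1 : List Int := [1, 2, 3, 4, 5]
  let arr2 : List Int := [2, 1, 2, 3, 2, 4, 2, 5]
  let arr3 : List Int := [3, 3, 1, 1, 2, 2, 4, 4, 5, 5]
  let count :=
    (PySem.List.enumerate answers 0).foldl
      (fun (c : Int × Int × Int) ia =>
        let c := if PySem.List.pyGetD arr1 (PySem.Int.mod ia.1 5) 0 = ia.2 then (c.1 + 1, c.2.1, c.2.2) else c
        let c := if PySem.List.pyGetD arr2 (PySem.Int.mod ia.1 8) 0 = ia.2 then (c.1, c.2.1 + 1, c.2.2) else c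
        if PySem.List.pyGetD arr3 (PySem.Int.mod ia.1 10) 0 = ia.2 then (c.1, c.2.1, c.2.2 + 1) else c)
      (0, 0, 0)
  let countL : List Int := [count.1, count.2.1, count.2.2]
  let maxVal := (PySem.List.max? countL (fun y => y)).getD 0
  (PySem.List.enumerate countL 0).foldl
    (fun acc iv => if iv.2 = maxVal then acc ++ [iv.1 + 1] else acc) []

-- ===== PORT B =====
-- B: tally (i % 40, a) pairs into a dict in one pass, then each score is a
-- 40-term tally.get lookup sum over one lcm period; then max and filter.
def solution_alt (answers : List Int) : List Int :=
  let tally :=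
    (PySem.List.enumerate answers 0).foldl
      (fun (d : PySem.Dict (Int × Int) Int) ia =>
        let key := (PySem.Int.mod ia.1 40, ia.2)
        d.insert key (d.getD key 0 + 1))
      PySem.Dict.empty
  let patterns : List (List Int) :=
    [[1, 2, 3, 4, 5], [2, 1, 2, 3, 2, 4, 2, 5], [3, 3, 1, 1, 2, 2, 4, 4, 5, 5]]
  let scores := patterns.map (fun p =>
    ((PySem.List.pyRange 0 40 1).map
      (fun r => tally.getD (r, PySem.List.pyGetD p (PySem.Int.mod r (p.length : Int)) 0) 0)).sum)
  let best := (PySem.List.max? scores (fun y => y)).getD 0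
  (PySem.List.enumerate scores 0).foldl
    (fun acc is => if is.2 = best then acc ++ [is.1 + 1] else acc) []

-- ===== PRECONDITION & SPEC =====
def Spec_solution (answers : List Int) (out : List Int) : Prop := out = solution_alt answers
instance (answers : List Int) (out : List Int) : Decidable (Spec_solution answers out) := by unfold Spec_solution; infer_instance

-- ===== CLAIM (what is proved, stated in full; the proofs are below) =====
def Claim_equal_solution : Prop := ∀ (answers : List Int), Dom_solution answers → Spec_solution answers (solution answers)

-- ===== LEMMAS AND PROOFS =====

-- number of matches of l against pattern p starting at absolute position s
def pvF (p : List Int) (s : Nat) (l : List Int) : Int :=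
  match l with
  | [] => 0
  | a :: t => (if p.getD (s % p.length) 0 = a then 1 else 0) + pvF p (s + 1) t

theorem pvA_fold (l : List Int) : ∀ (s : Nat) (c : Int × Int × Int),
    (PySem.List.enumerate l (s : Int)).foldl
      (fun (c : Int × Int × Int) ia =>
        let c := if PySem.List.pyGetD [1, 2, 3, 4, 5] (PySem.Int.mod ia.1 5) 0 = ia.2 then (c.1 + 1, c.2.1, c.2.2) else c
        let c := if PySem.List.pyGetD [2, 1, 2, 3, 2, 4, 2, 5] (PySem.Int.mod ia.1 8) 0 = ia.2 then (c.1, c.2.1 + 1, c.2.2) else c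
        if PySem.List.pyGetD [3, 3, 1, 1, 2, 2, 4, 4, 5, 5] (PySem.Int.mod ia.1 10) 0 = ia.2 then (c.1, c.2.1, c.2.2 + 1) else c)
      c
    = (c.1 + pvF [1, 2, 3, 4, 5] s l,
       c.2.1 + pvF [2, 1, 2, 3, 2, 4, 2, 5] s l,
       c.2.2 + pvF [3, 3, 1, 1, 2, 2, 4, 4, 5, 5] s l) := by
  induction l with
  | nil => intro s c; simp [PySem.List.enumerate_nil, pvF]
  | cons a t ih =>
    intro s c
    rw [PySem.List.enumerate_cons, List.foldl_cons,
        show ((s : Int) + 1) = ((s + 1 : Nat) : Int) by push_cast; ring, ih]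
    have e5 : PySem.Int.mod (s : Int) 5 = ((s % 5 : Nat) : Int) := by
      rw [PySem.Int.mod_eq_emod_of_pos (by norm_num)]; omega
    have e8 : PySem.Int.mod (s : Int) 8 = ((s % 8 : Nat) : Int) := by
      rw [PySem.Int.mod_eq_emod_of_pos (by norm_num)]; omega
    have e10 : PySem.Int.mod (s : Int) 10 = ((s % 10 : Nat) : Int) := by
      rw [PySem.Int.mod_eq_emod_of_pos (by norm_num)]; omega
    simp only [pvF, e5, e8, e10, PySem.List.pyGetD_natCast]
    norm_num [Prod.ext_iff, List.getD_eq_getElem?_getD]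
    split_ifs <;> norm_num <;> omega

-- B-side abstraction: the 40-term lookup sum, with the dict replaced by pair counts
def pvS (p : List Int) (L : List (Int × Int)) : Int :=
  ((List.range 40).map
    (fun (k : Nat) => ((L.count ((k : Int), p.getD (k % p.length) 0) : Nat) : Int))).sum

theorem pv_sum_range_ite (n m : Nat) (hm : m < n) (C : Int) :
    ((List.range n).map (fun k => if k = m then C else 0)).sum = C := by
  induction n with
  | zero => omega
  | succ n ih =>
    rw [List.range_succ, List.map_append, List.sum_append]
    by_cases h : m = n
    · subst h
      have hz : ∀ k ∈ List.range m, (if k = m then C else (0:Int)) = 0 := by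
        intro k hk
        rw [if_neg]
        exact fun he => by simp [he] at hk
      rw [List.map_congr_left hz]
      simp
    · rw [ih (by omega)]
      have hn : (if n = m then C else (0:Int)) = 0 := by
        rw [if_neg (fun he => h he.symm)]
      simp [hn]

theorem pvS_cons (p : List Int) (x1 x2 : Int) (L : List (Int × Int)) (s : Nat)
    (hx : x1 = ((s % 40 : Nat) : Int)) :
    pvS p ((x1, x2) :: L)
      = pvS p L + (if p.getD ((s % 40) % p.length) 0 = x2 then 1 else 0) := by
  subst hx
  unfold pvS
  have hterm : ∀ k ∈ List.range 40,
      ((((((s % 40 : Nat) : Int), x2) :: L).count ((k : Int), p.getD (k % p.length) 0) : Nat) : Int)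
      = ((L.count ((k : Int), p.getD (k % p.length) 0) : Nat) : Int)
        + (if k = s % 40 then (if p.getD ((s % 40) % p.length) 0 = x2 then (1:Int) else 0) else 0) := by
    intro k _
    simp only [List.count_cons, beq_iff_eq, Prod.mk.injEq]
    by_cases hk : k = s % 40
    · subst hk
      by_cases hv : p.getD ((s % 40) % p.length) 0 = x2
      · rw [if_pos ⟨rfl, hv.symm⟩, if_pos rfl, if_pos hv]
        push_cast
        ring
      · rw [if_neg (fun h => hv h.2.symm), if_pos rfl, if_neg hv]
        push_cast
        ring
    · rw [if_neg (fun h => hk (by exact_mod_cast h.1.symm)), if_neg hk]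
      push_cast
      ring
  rw [List.map_congr_left hterm,
      PySem.List.sum_map_add_int (List.range 40)
        (fun (k : Nat) => ((L.count ((k : Int), p.getD (k % p.length) 0) : Nat) : Int))
        (fun (k : Nat) => if k = s % 40 then (if p.getD ((s % 40) % p.length) 0 = x2 then (1:Int) else 0) else 0),
      pv_sum_range_ite 40 (s % 40) (by omega)]

theorem pvB_count (p : List Int) (hlen : 0 < p.length) (hdvd : p.length ∣ 40)
    (l : List Int) : ∀ (s : Nat),
    pvS p ((PySem.List.enumerate l (s : Int)).map
      (fun ia => (PySem.Int.mod ia.1 40, ia.2))) = pvF p s l := by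
  induction l with
  | nil => intro s; simp [PySem.List.enumerate_nil, pvS, pvF]
  | cons a t ih =>
    intro s
    rw [PySem.List.enumerate_cons, List.map_cons,
        show ((s : Int) + 1) = ((s + 1 : Nat) : Int) by push_cast; ring]
    have e40 : PySem.Int.mod (s : Int) 40 = ((s % 40 : Nat) : Int) := by
      rw [PySem.Int.mod_eq_emod_of_pos (by norm_num)]; omega
    rw [pvS_cons p (PySem.Int.mod (s : Int) 40) a _ s e40, ih (s + 1)]
    have hmod : (s % 40) % p.length = s % p.length := Nat.mod_mod_of_dvd s hdvd
    rw [hmod]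
    simp [pvF]; ring

-- bridge: B's dict-lookup score for pattern p equals pvS of the keyed pair list
theorem pvB_score (p : List Int) (hlen : 0 < p.length) (answers : List Int) :
    ((PySem.List.pyRange 0 40 1).map
      (fun r => ((PySem.List.enumerate answers 0).foldl
          (fun (d : PySem.Dict (Int × Int) Int) ia =>
            let key := (PySem.Int.mod ia.1 40, ia.2)
            d.insert key (d.getD key 0 + 1))
          PySem.Dict.empty).getD
        (r, PySem.List.pyGetD p (PySem.Int.mod r (p.length : Int)) 0) 0)).sum
    = pvS p ((PySem.List.enumerate answers 0).map
        (fun ia => (PySem.Int.mod ia.1 40, ia.2))) := by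
  have hfold :
      (PySem.List.enumerate answers 0).foldl
        (fun (d : PySem.Dict (Int × Int) Int) ia =>
          let key := (PySem.Int.mod ia.1 40, ia.2)
          d.insert key (d.getD key 0 + 1))
        PySem.Dict.empty
      = ((PySem.List.enumerate answers 0).map
          (fun ia => (PySem.Int.mod ia.1 40, ia.2))).foldl
          (fun (d : PySem.Dict (Int × Int) Int) x => d.insert x (d.getD x 0 + 1))
          PySem.Dict.empty := by
    rw [List.foldl_map]
  rw [hfold, PySem.List.pyRange_one,
      show ((40 : Int) - 0).toNat = 40 by decide]
  unfold pvS
  rw [List.map_map]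
  refine congrArg List.sum (List.map_congr_left ?_)
  intro k hk
  have emod : PySem.Int.mod ((k : Nat) : Int) ((p.length : Nat) : Int)
      = ((k % p.length : Nat) : Int) := by
    rw [PySem.Int.mod_eq_emod_of_pos (by exact_mod_cast hlen)]
    omega
  simp only [Function.comp_apply, zero_add]
  rw [emod, PySem.List.pyGetD_natCast p (k % p.length) 0,
      PySem.Dict.getD_foldl_insert_add_one, PySem.Dict.getD_empty]
  ring

theorem solution_eq_alt (answers : List Int) : solution answers = solution_alt answers := by
  have hb1 := pvB_count [1,2,3,4,5] (by simp) (by norm_num) answers 0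
  have hb2 := pvB_count [2,1,2,3,2,4,2,5] (by simp) (by norm_num) answers 0
  have hb3 := pvB_count [3,3,1,1,2,2,4,4,5,5] (by simp) (by norm_num) answers 0
  rw [Nat.cast_zero] at hb1 hb2 hb3
  have h := pvA_fold answers 0 ((0 : Int), (0 : Int), (0 : Int))
  rw [Nat.cast_zero] at h
  unfold solution solution_alt
  simp only [List.map_cons, List.map_nil, h,
    pvB_score [1,2,3,4,5] (by simp) answers,
    pvB_score [2,1,2,3,2,4,2,5] (by simp) answers,
    pvB_score [3,3,1,1,2,2,4,4,5,5] (by simp) answers,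
    hb1, hb2, hb3]
  norm_num

-- ===== VERDICT (by name: the statement is the Claim_ definition above) =====
theorem solution_spec : Claim_equal_solution := by
  intro answers _
  exact solution_eq_alt answers
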